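-- pv_equiv track=rewrite | github.com/DoctorLoki/tools | formatjson.py | sorted_keys
-- ===== SOURCE A (Python) =====
-- def sorted_keys(keys):
-- 	keys1 = []
-- 	keys2 = []
-- 	for key in keys:
-- 		if key.lower() in ["id", "uuid"]:
-- 			keys2.append(key) # Sort these later to give diff a chance to match earlier data.
-- 		else:
-- 			keys1.append(key)
-- 	keys1.sort()
-- 	keys2.sort()
-- 	#return keys1[:1] + keys2 + keys1[1:] # Insert ids just after the first entry.
-- 	return keys1 + keys2 # Insert ids last.
-- ===== SOURCE B (Python) =====
-- def sorted_keys(keys):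
-- 	return sorted(keys, key=lambda k: (k.lower() in ("id", "uuid"), k))
-- ===== Notes on version B (the rewrite author's own statement) =====
-- stated objective: simpler
-- what changed: Replaces the partition-into-two-lists-then-sort-each-and-concatenate loop with a single keyed sort whose compound key (is-id/uuid flag, key) does the grouping and ordering in one call.
import Mathlib
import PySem

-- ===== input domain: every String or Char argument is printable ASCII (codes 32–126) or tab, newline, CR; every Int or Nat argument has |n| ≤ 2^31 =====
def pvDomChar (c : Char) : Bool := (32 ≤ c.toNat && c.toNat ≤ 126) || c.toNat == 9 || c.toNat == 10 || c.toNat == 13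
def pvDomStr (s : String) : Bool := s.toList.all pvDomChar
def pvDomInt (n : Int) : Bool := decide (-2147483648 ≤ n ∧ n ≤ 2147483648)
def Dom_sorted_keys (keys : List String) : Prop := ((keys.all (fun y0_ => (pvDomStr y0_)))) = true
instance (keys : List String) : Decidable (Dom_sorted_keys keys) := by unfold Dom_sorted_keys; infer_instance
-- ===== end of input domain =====

-- B replaces A's partition-then-sort-each-then-concatenate with one keyed sort on the
-- compound key (is-id/uuid flag, key); same cost, simpler decomposition.

-- ===== PORT A =====
-- partition loop, then sort each part, then concatenate
def sorted_keys (keys : List String) : List String :=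
  let p := keys.foldl
    (fun (acc : List String × List String) key =>
      if PySem.Str.lower key ∈ (["id", "uuid"] : List String) then (acc.1, acc.2 ++ [key])
      else (acc.1 ++ [key], acc.2))
    ([], [])
  PySem.List.sorted p.1 (fun x => x) ++ PySem.List.sorted p.2 (fun x => x)

-- ===== PORT B =====
-- single stable sort with the tuple key (k.lower() in ("id","uuid"), k)
def sorted_keys_alt (keys : List String) : List String :=
  PySem.List.sorted2 keys
    (fun k => decide (PySem.Str.lower k ∈ (["id", "uuid"] : List String)))
    (fun k => k)

-- ===== PRECONDITION & SPEC =====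
def Spec_sorted_keys (keys : List String) (out : List String) : Prop := out = sorted_keys_alt keys
instance (keys : List String) (out : List String) : Decidable (Spec_sorted_keys keys out) := by unfold Spec_sorted_keys; infer_instance

-- ===== CLAIM (what is proved, stated in full; the proofs are below) =====
def Claim_equal_sorted_keys : Prop := ∀ (keys : List String), Dom_sorted_keys keys → Spec_sorted_keys keys (sorted_keys keys)

-- ===== LEMMAS AND PROOFS =====

-- the Boolean id/uuid flag and the lexicographic 'before' test of B's sorted2
def pvFlag (k : String) : Bool := decide (PySem.Str.lower k ∈ (["id", "uuid"] : List String))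

def pvLt (a b : String) : Bool :=
  decide (pvFlag a < pvFlag b) || (!decide (pvFlag b < pvFlag a) && decide (a < b))

-- inserting a non-flagged x into A ++ B (A non-flagged, B flagged) inserts into A
theorem pv_insert_false (x : String) (hx : pvFlag x = false) :
    ∀ (A B : List String), (∀ y ∈ A, pvFlag y = false) → (∀ y ∈ B, pvFlag y = true) →
      PySem.List.insertBy pvLt x (A ++ B) =
        PySem.List.insertBy (fun a b => decide (a < b)) x A ++ B := by
  intro A
  induction A with
  | nil =>
      intro B _ hB
      cases B with
      | nil => rfl
      | cons b B' =>
          have hb : pvFlag b = true := hB b (by simp)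
          simp [PySem.List.insertBy, pvLt, hx, hb]
  | cons a A' ih =>
      intro B hA hB
      have ha : pvFlag a = false := hA a (by simp)
      by_cases hlt : x < a
      · simp [PySem.List.insertBy, pvLt, hx, ha, hlt]
      · simp only [List.cons_append]
        simp [PySem.List.insertBy, pvLt, hx, ha, hlt,
          ih B (fun y hy => hA y (by simp [hy])) hB]

-- insertBy only looks at 'before x ·' on the members of the list
theorem pv_insertBy_congr {α : Type} (f g : α → α → Bool) (x : α) :
    ∀ (ys : List α), (∀ y ∈ ys, f x y = g x y) →
      PySem.List.insertBy f x ys = PySem.List.insertBy g x ys := by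
  intro ys
  induction ys with
  | nil => intro _; rfl
  | cons y ys' ih =>
      intro h
      have hy := h y (by simp)
      by_cases hb : f x y = true
      · simp [PySem.List.insertBy, hb, hy ▸ hb]
      · have hb' : g x y ≠ true := by rw [← hy]; exact hb
        simp [PySem.List.insertBy, hb, hb', ih (fun z hz => h z (by simp [hz]))]

-- inserting a flagged x into A ++ B inserts into B
theorem pv_insert_true (x : String) (hx : pvFlag x = true) :
    ∀ (A B : List String), (∀ y ∈ A, pvFlag y = false) → (∀ y ∈ B, pvFlag y = true) →
      PySem.List.insertBy pvLt x (A ++ B) =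
        A ++ PySem.List.insertBy (fun a b => decide (a < b)) x B := by
  intro A
  induction A with
  | nil =>
      intro B _ hB
      simpa using pv_insertBy_congr pvLt (fun a b => decide (a < b)) x B
        (fun y hy => by simp [pvLt, hx, hB y hy])
  | cons a A' ih =>
      intro B hA hB
      have ha : pvFlag a = false := hA a (by simp)
      simp only [List.cons_append]
      simp [PySem.List.insertBy, pvLt, hx, ha,
        ih B (fun y hy => hA y (by simp [hy])) hB]

-- the sorted2 fold, started on a split accumulator, stays split
theorem pv_fold_split (keys : List String) :
    ∀ (A B : List String), (∀ y ∈ A, pvFlag y = false) → (∀ y ∈ B, pvFlag y = true) →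
      keys.foldl (fun acc x => PySem.List.insertBy pvLt x acc) (A ++ B) =
        (keys.filter (fun k => !pvFlag k)).foldl
          (fun acc x => PySem.List.insertBy (fun a b => decide (a < b)) x acc) A ++
        (keys.filter pvFlag).foldl
          (fun acc x => PySem.List.insertBy (fun a b => decide (a < b)) x acc) B := by
  induction keys with
  | nil => intro A B _ _; rfl
  | cons k ks ih =>
      intro A B hA hB
      cases hk : pvFlag k with
      | false =>
          have h1 := pv_insert_false k hk A B hA hB
          simp only [List.foldl_cons, h1, List.filter_cons, hk]
          exact ih _ B
            (fun y hy => by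
              rcases (PySem.List.mem_insertBy _ k y A).1 hy with h | h
              · simpa [h] using hk
              · exact hA y h)
            hB
      | true =>
          have h1 := pv_insert_true k hk A B hA hB
          simp only [List.foldl_cons, h1, List.filter_cons, hk]
          exact ih A _ hA
            (fun y hy => by
              rcases (PySem.List.mem_insertBy _ k y B).1 hy with h | h
              · simpa [h] using hk
              · exact hB y h)

-- A's partition loop computes the two filters
theorem pv_partition (keys : List String) :
    keys.foldl
      (fun (acc : List String × List String) key =>
        if PySem.Str.lower key ∈ (["id", "uuid"] : List String) then (acc.1, acc.2 ++ [key])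
        else (acc.1 ++ [key], acc.2))
      ([], []) = (keys.filter (fun k => !pvFlag k), keys.filter pvFlag) := by
  induction keys using List.reverseRecOn with
  | nil => rfl
  | append_singleton ks k ih =>
      simp only [List.foldl_append, List.foldl_cons, List.foldl_nil, ih,
        List.filter_append, List.filter_cons, List.filter_nil]
      by_cases h : PySem.Str.lower k ∈ (["id", "uuid"] : List String) <;>
        simp [pvFlag, h]

-- ===== VERDICT (by name: the statement is the Claim_ definition above) =====
theorem sorted_keys_spec : Claim_equal_sorted_keys := by
  intro keys _
  unfold Spec_sorted_keys sorted_keys sorted_keys_alt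
  simp only [pv_partition]
  have h2 : PySem.List.sorted2 keys
      (fun k => decide (PySem.Str.lower k ∈ (["id", "uuid"] : List String))) (fun k => k) =
      keys.foldl (fun acc x => PySem.List.insertBy pvLt x acc) ([] ++ []) := by
    rfl
  rw [h2, pv_fold_split keys [] [] (by simp) (by simp),
    ← PySem.List.sorted_eq_foldl_insertBy, ← PySem.List.sorted_eq_foldl_insertBy]
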